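-- pv_equiv track=rewrite | github.com/gramiset/optimal_purchase_planner | app/src/processor/input_processor_file.py | duplicates_exist
-- ===== SOURCE A (Python) =====
-- def duplicates_exist(columns):
--     columns_set = set()
--     for column in columns:
--         if '.' in column:
--             columns_set.add(column.split('.')[0])
--         else:
--             columns_set.add(column)
--     return len(columns) != len(columns_set)
-- ===== SOURCE B (Python) =====
-- def duplicates_exist(columns):
--     bases = sorted(c.split('.')[0] for c in columns)
--     return any(a == b for a, b in zip(bases, bases[1:]))
-- ===== Notes on version B (the rewrite author's own statement) =====
-- stated objective: alternative
-- what changed: Replaces the hash-set size comparison with normalize-every-column-to-its-pre-'.'-base, sort, and a single adjacent-pair scan for a duplicate.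
import Mathlib
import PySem

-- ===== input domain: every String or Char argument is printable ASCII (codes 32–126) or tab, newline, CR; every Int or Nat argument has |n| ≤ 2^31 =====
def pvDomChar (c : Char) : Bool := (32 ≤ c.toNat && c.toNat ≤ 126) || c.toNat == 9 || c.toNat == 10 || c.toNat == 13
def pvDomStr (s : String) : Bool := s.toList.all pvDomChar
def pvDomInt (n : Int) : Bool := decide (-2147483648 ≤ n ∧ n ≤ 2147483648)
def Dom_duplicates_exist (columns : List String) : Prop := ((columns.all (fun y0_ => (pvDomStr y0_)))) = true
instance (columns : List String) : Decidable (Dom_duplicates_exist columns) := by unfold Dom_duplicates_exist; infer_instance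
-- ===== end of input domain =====

-- B replaces A's hash-set size comparison by a sort of the normalized column bases
-- followed by a single adjacent-pair scan (alternative algorithm, same result).

-- ===== PORT A =====
def duplicates_exist (columns : List String) : Bool :=
  let columns_set := columns.foldl (fun s column =>
    if PySem.Str.isIn "." column then
      -- column.split('.')[0]: split with a nonempty separator always yields a
      -- nonempty list, so the [0] index cannot raise; totalized with getD.
      PySem.Set.add s ((PySem.List.pyGet? ((PySem.Str.split? column ".").getD []) 0).getD "")
    else
      PySem.Set.add s column) PySem.Set.empty
  decide ((columns.length : Int) ≠ PySem.Set.len columns_set)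

-- ===== PORT B =====
-- c.split('.')[0] (total: the split list is never empty)
def pvBase (c : String) : String :=
  (PySem.List.pyGet? ((PySem.Str.split? c ".").getD []) 0).getD ""

-- any(a == b for a, b in zip(bases, bases[1:])): scan adjacent pairs
def pvHasAdjDup : List String → Bool
  | x :: y :: rest => x == y || pvHasAdjDup (y :: rest)
  | _ => false

def duplicates_exist_alt (columns : List String) : Bool :=
  pvHasAdjDup (PySem.List.sorted (columns.map pvBase) (fun x => x) false)

-- ===== PRECONDITION & SPEC =====
def Spec_duplicates_exist (columns : List String) (out : Bool) : Prop := out = duplicates_exist_alt columns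
instance (columns : List String) (out : Bool) : Decidable (Spec_duplicates_exist columns out) := by unfold Spec_duplicates_exist; infer_instance

-- ===== CLAIM (what is proved, stated in full; the proofs are below) =====
def Claim_equal_duplicates_exist : Prop := ∀ (columns : List String), Dom_duplicates_exist columns → Spec_duplicates_exist columns (duplicates_exist columns)

-- ===== LEMMAS AND PROOFS =====

-- splitOn.go never meets the separator: it returns the one remaining piece.
theorem pv_splitOn_go_no_sep (sep : List Char) (fuel : Nat) :
    ∀ (l cur : List Char) (acc : List (List Char)),
      (∀ t, t <:+ l → ¬ sep <+: t) →
      PySem.Chars.splitOn.go sep fuel l cur acc = ((cur.reverse ++ l) :: acc).reverse := by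
  induction fuel with
  | zero => intro l cur acc _; rw [PySem.Chars.splitOn.go.eq_def]
  | succ n ih =>
    intro l cur acc h
    cases l with
    | nil => rw [PySem.Chars.splitOn.go.eq_def]; simp
    | cons c rest =>
      rw [PySem.Chars.splitOn.go.eq_def]
      have hnp : ¬ sep.isPrefixOf (c :: rest) = true := by
        intro hp
        exact h (c :: rest) (List.suffix_refl _) (List.isPrefixOf_iff_prefix.mp hp)
      simp only [hnp]
      rw [ih rest (c :: cur) acc (fun t ht => h t (ht.trans (List.suffix_cons c rest)))]
      simp

theorem pv_splitOn_no_sep (s sep : List Char) (h : ¬ sep <:+: s) :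
    PySem.Chars.splitOn s sep = [s] := by
  unfold PySem.Chars.splitOn
  rw [pv_splitOn_go_no_sep]
  · simp
  · intro t ht hp
    exact h (hp.isInfix.trans ht.isInfix)

theorem pvBase_of_not_isIn (c : String) (h : PySem.Str.isIn "." c = false) :
    pvBase c = c := by
  unfold pvBase
  unfold PySem.Str.isIn at h
  have hni : ¬ (".".toList <:+: c.toList) := (PySem.Chars.isIn_eq_false_iff _ _).mp h
  rw [PySem.Str.split?]
  rw [PySem.Chars.split?]
  simp only [List.isEmpty]
  rw [pv_splitOn_no_sep _ _ hni]
  simp [String.ofList_toList]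

-- A's set is set(map(base, columns)).
theorem pv_foldl_eq_ofList (columns : List String) :
    columns.foldl (fun s column =>
      if PySem.Str.isIn "." column then
        PySem.Set.add s ((PySem.List.pyGet? ((PySem.Str.split? column ".").getD []) 0).getD "")
      else
        PySem.Set.add s column) PySem.Set.empty
    = PySem.Set.ofList (columns.map pvBase) := by
  rw [PySem.List.foldl_congr_mem columns _ (fun s column => PySem.Set.add s (pvBase column)) _ ?_]
  · rw [← PySem.Set.update_map_eq_foldl_add,
      show (PySem.Set.empty : PySem.Set String) = [] from rfl, PySem.Set.update_nil_left]
  · intro acc x _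
    by_cases hx : PySem.Str.isIn "." x = true
    · rw [if_pos hx]; rfl
    · simp only [Bool.not_eq_true] at hx
      rw [if_neg (by simp only [hx]; exact Bool.false_ne_true)]
      show acc.add x = acc.add (pvBase x)
      rw [pvBase_of_not_isIn x hx]

-- |set(xs)| = |xs| iff xs has no duplicates.
theorem pv_len_ofList_eq_iff {α : Type} [BEq α] [LawfulBEq α] [DecidableEq α] (xs : List α) :
    (PySem.Set.ofList xs).length = xs.length ↔ xs.Nodup := by
  constructor
  · intro hlen
    have hperm : (PySem.Set.ofList xs).Perm xs.dedup := by
      apply (List.perm_ext_iff_of_nodup (PySem.Set.nodup_ofList xs) xs.nodup_dedup).mpr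
      intro a
      rw [PySem.Set.mem_ofList, List.mem_dedup]
    have h2 : xs.dedup.length = xs.length := by
      rw [← hperm.length_eq, hlen]
    have := (xs.dedup_sublist).eq_of_length h2
    rw [← this]
    exact xs.nodup_dedup
  · intro hnd
    rw [PySem.Set.ofList_eq_self_of_nodup xs hnd]

-- on a ≤-sorted list, no adjacent duplicate means no duplicate at all.
theorem pv_hasAdjDup_sorted (l : List String) (hs : l.Pairwise (· ≤ ·)) :
    pvHasAdjDup l = false ↔ l.Nodup := by
  induction l with
  | nil => simp [pvHasAdjDup]
  | cons x t ih =>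
    cases t with
    | nil => simp [pvHasAdjDup]
    | cons y r =>
      have hpt : (y :: r).Pairwise (· ≤ ·) := (List.pairwise_cons.mp hs).2
      have hxle : ∀ z ∈ y :: r, x ≤ z := (List.pairwise_cons.mp hs).1
      rw [show pvHasAdjDup (x :: y :: r) = (x == y || pvHasAdjDup (y :: r)) from rfl]
      rw [Bool.or_eq_false_iff, ih hpt]
      constructor
      · rintro ⟨hxy, hnd⟩
        have hxy' : x ≠ y := by simpa using hxy
        refine List.nodup_cons.mpr ⟨?_, hnd⟩
        intro hmem
        rcases List.mem_cons.mp hmem with h | h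
        · exact hxy' h
        · have hxy2 : x < y := lt_of_le_of_ne (hxle y List.mem_cons_self) hxy'
          have hyz : y ≤ x := (List.pairwise_cons.mp hpt).1 x h
          exact absurd (le_of_lt hxy2) (not_le.mpr (lt_of_le_of_ne hyz (fun he => hxy' he.symm)))
      · intro hnd
        rcases List.nodup_cons.mp hnd with ⟨hnm, hnd'⟩
        have hxy : x ≠ y := fun he => hnm (by rw [he]; exact List.mem_cons_self)
        exact ⟨by simpa using hxy, hnd'⟩

theorem pv_main (columns : List String) :
    duplicates_exist columns = duplicates_exist_alt columns := by
  unfold duplicates_exist duplicates_exist_alt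
  rw [pv_foldl_eq_ofList]
  set bases := columns.map pvBase with hb
  have hlen : columns.length = bases.length := by simp [hb]
  have hA : (decide ((columns.length : Int) ≠ PySem.Set.len (PySem.Set.ofList bases)))
      = !decide bases.Nodup := by
    by_cases h : bases.Nodup
    · have heq := (pv_len_ofList_eq_iff bases).mpr h
      simp [PySem.Set.len, hlen, heq, h]
    · have hne : (PySem.Set.ofList bases).length ≠ bases.length :=
        fun hc => h ((pv_len_ofList_eq_iff bases).mp hc)
      simp only [h, decide_false, Bool.not_false, decide_eq_true_eq, PySem.Set.len, hlen]
      intro hc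
      exact hne (by exact_mod_cast hc.symm)
  rw [hA]
  have hsp : (PySem.List.sorted bases (fun x => x) false).Pairwise (· ≤ ·) :=
    PySem.List.sorted_pairwise bases (fun x => x)
  have hnd : (PySem.List.sorted bases (fun x => x) false).Nodup ↔ bases.Nodup :=
    (PySem.List.sorted_perm bases (fun x => x) false).nodup_iff
  rcases hB : pvHasAdjDup (PySem.List.sorted bases (fun x => x) false) with _ | _
  · have := (pv_hasAdjDup_sorted _ hsp).mp hB
    simp [hnd.mp this]
  · have : ¬ (PySem.List.sorted bases (fun x => x) false).Nodup := by
      intro h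
      rw [(pv_hasAdjDup_sorted _ hsp).mpr h] at hB
      exact Bool.false_ne_true hB
    simp [hnd.not.mp this]

-- ===== VERDICT (by name: the statement is the Claim_ definition above) =====
theorem duplicates_exist_spec : Claim_equal_duplicates_exist := by
  intro columns _
  unfold Spec_duplicates_exist
  exact pv_main columns
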